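-- pv_equiv track=rewrite | github.com/anglil/translate_0 | oov_translate/utils.py | get_bin_by_thread
-- ===== SOURCE A (Python) =====
-- def get_bin_by_thread(thread_num, total_num):
--     '''
--     bucket total_num of instances into bins for parallelization
--     params:
--         thread_num: number of threads the system supports at most
--         total_num: total number of instances to parallelize
--     return:
--         bins: arrays of boundaries: [[ctr_lo, ctr_up]...]
--     '''
--     bins = []
--     bin_base_size = int(total_num/thread_num)
--     bin_residual = total_num%thread_num
--     ctr = 0
--     while ctr < total_num:
--         ctr_lo = ctr
--         if bin_residual > 0:
--             ctr_up = ctr + bin_base_size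
--             bin_residual -= 1
--         else:
--             ctr_up = ctr + bin_base_size - 1
--         bins.append([ctr_lo, ctr_up])
--         ctr = ctr_up + 1
--     return bins
-- ===== SOURCE B (Python) =====
-- def get_bin_by_thread(thread_num, total_num):
--     '''Closed-form bins: each bin's bounds are derived directly from its index.'''
--     base, residual = divmod(total_num, thread_num)
--     bins = []
--     for i in range(min(thread_num, total_num)):
--         lo = i * base + min(i, residual)
--         hi = lo + base + (1 if i < residual else 0) - 1
--         bins.append([lo, hi])
--     return bins
-- ===== Notes on version B (the rewrite author's own statement) =====
-- stated objective: alternative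
-- what changed: Replaces the stateful while-loop threading a running counter and decrementing residual with a for-loop over min(thread_num, total_num) bin indices whose bounds are computed in closed form from the index.
import Mathlib
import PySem

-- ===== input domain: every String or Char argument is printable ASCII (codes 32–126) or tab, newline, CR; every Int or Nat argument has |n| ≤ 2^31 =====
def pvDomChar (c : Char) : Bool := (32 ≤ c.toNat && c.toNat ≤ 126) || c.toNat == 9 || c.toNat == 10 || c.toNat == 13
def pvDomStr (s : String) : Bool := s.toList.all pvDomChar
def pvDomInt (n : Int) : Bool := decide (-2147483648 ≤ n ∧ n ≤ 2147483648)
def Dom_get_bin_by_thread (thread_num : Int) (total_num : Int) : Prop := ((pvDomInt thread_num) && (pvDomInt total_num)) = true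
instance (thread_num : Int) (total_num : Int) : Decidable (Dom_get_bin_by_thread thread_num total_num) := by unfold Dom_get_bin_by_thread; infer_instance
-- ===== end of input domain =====

-- B replaces A's stateful while-loop (running counter, decrementing residual) by a
-- for-loop over bin indices with each bin's bounds computed in closed form (alternative decomposition, same cost).


-- ===== PORT A =====
-- A's while loop; fuel total_num.toNat suffices inside Pre_, where each iteration advances ctr by ≥ 1
def pvLoopA (base : Int) (total : Int) (residual ctr : Int) (bins : List (List Int)) (fuel : Nat) : List (List Int) :=
  match fuel with
  | 0 => bins
  | fuel + 1 =>
    if ctr < total then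
      if residual > 0 then
        pvLoopA base total (residual - 1) (ctr + base + 1) (bins ++ [[ctr, ctr + base]]) fuel
      else
        pvLoopA base total residual (ctr + base - 1 + 1) (bins ++ [[ctr, ctr + base - 1]]) fuel
    else bins

def get_bin_by_thread (thread_num : Int) (total_num : Int) : List (List Int) :=
  -- int(total_num/thread_num) truncates toward zero; exact as Int.tdiv on the domain |args| ≤ 2^31,
  -- where the float division cannot round across an integer boundary
  let bin_base_size := Int.tdiv total_num thread_num
  let bin_residual := PySem.Int.mod total_num thread_num
  pvLoopA bin_base_size total_num bin_residual 0 [] total_num.toNat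

-- ===== PORT B =====
def get_bin_by_thread_alt (thread_num : Int) (total_num : Int) : List (List Int) :=
  let base := PySem.Int.floordiv total_num thread_num
  let residual := PySem.Int.mod total_num thread_num
  (List.range (min thread_num total_num).toNat).map (fun (i : Nat) =>
    let lo := (i : Int) * base + min (i : Int) residual
    let hi := lo + base + (if (i : Int) < residual then 1 else 0) - 1
    [lo, hi])

-- ===== PRECONDITION & SPEC =====
-- Pre_ excludes thread_num = 0 (A raises ZeroDivisionError) and thread_num < 0 with
-- total_num > 0 (A's while loop never terminates); on every other input A returns.
def Pre_get_bin_by_thread (thread_num : Int) (total_num : Int) : Prop :=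
  thread_num ≠ 0 ∧ (0 < thread_num ∨ total_num ≤ 0)
instance (thread_num : Int) (total_num : Int) : Decidable (Pre_get_bin_by_thread thread_num total_num) := by unfold Pre_get_bin_by_thread; infer_instance

def pvWitness_get_bin_by_thread : Int × Int := (3, 10)

def Spec_get_bin_by_thread (thread_num : Int) (total_num : Int) (out : List (List Int)) : Prop := out = get_bin_by_thread_alt thread_num total_num
instance (thread_num : Int) (total_num : Int) (out : List (List Int)) : Decidable (Spec_get_bin_by_thread thread_num total_num out) := by unfold Spec_get_bin_by_thread; infer_instance

-- ===== CLAIM (what is proved, stated in full; the proofs are below) =====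
def Claim_equal_get_bin_by_thread : Prop := ∀ (thread_num : Int) (total_num : Int), Dom_get_bin_by_thread thread_num total_num → Pre_get_bin_by_thread thread_num total_num → Spec_get_bin_by_thread thread_num total_num (get_bin_by_thread thread_num total_num)

-- ===== LEMMAS AND PROOFS =====

-- the closed-form bin for index i (B's loop body)
def pvBin (q r : Int) (i : Int) : List Int :=
  [i * q + min i r, i * q + min i r + q + (if i < r then 1 else 0) - 1]

-- the loop guard fires exactly while i < min t n
lemma pvGuard_iff (t n q r i : Int) (ht : 0 < t) (_hn : 0 < n)
    (hq : 0 ≤ q) (hnr : n = t * q + r) (hr0 : 0 ≤ r) (hrt : r < t) (_hi0 : 0 ≤ i)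
    (hiN : i ≤ min t n) :
    (i * q + min i r < n) ↔ i < min t n := by
  rcases eq_or_lt_of_le hq with hq1 | hq1
  · -- q = 0 : n = r, min t n = n, ctr = i
    subst hq1
    simp only [mul_zero] at *
    omega
  · -- q ≥ 1 : min t n = t
    have htn : t ≤ n := by nlinarith
    have hmin : min t n = t := min_eq_left htn
    constructor
    · intro h
      by_contra hcon
      have hie : i = t := by omega
      have hmr : min t r = r := by omega
      rw [hie, hmr] at h
      linarith
    · intro h
      have key : i * q ≤ (t - 1) * q := mul_le_mul_of_nonneg_right (by omega) hq
      have hm : min i r ≤ r := min_le_right _ _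
      nlinarith
  
-- loop invariant: starting from the state after i conceptual iterations, the loop
-- appends exactly B's bins i, i+1, …, min t n - 1.
lemma pvLoopA_inv (t n q r : Int) (ht : 0 < t) (hn : 0 < n)
    (hq : 0 ≤ q) (hnr : n = t * q + r) (hr0 : 0 ≤ r) (hrt : r < t) :
    ∀ (fuel : Nat) (i : Int) (acc : List (List Int)),
      0 ≤ i → i ≤ min t n → (min t n - i).toNat ≤ fuel →
      pvLoopA q n (r - min i r) (i * q + min i r) acc fuel
        = acc ++ (List.range (min t n - i).toNat).map (fun j : Nat => pvBin q r (i + (j : Int))) := by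
  intro fuel
  induction fuel with
  | zero =>
    intro i acc hi0 hiN hfuel
    have h0 : (min t n - i).toNat = 0 := Nat.le_zero.mp hfuel
    simp only [h0, List.range_zero, List.map_nil, List.append_nil]
    simp [pvLoopA]
  | succ fuel ih =>
    intro i acc hi0 hiN hfuel
    rcases eq_or_lt_of_le hiN with hin | hin
    · -- i = min t n : the guard is false, the loop exits
      have hctr : ¬ (i * q + min i r < n) := by
        rw [pvGuard_iff t n q r i ht hn hq hnr hr0 hrt hi0 hiN]; omega
      have h0 : (min t n - i).toNat = 0 := by omega
      simp only [h0, List.range_zero, List.map_nil, List.append_nil]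
      simp [pvLoopA, hctr]
    · -- i < min t n : one more iteration
      have hctr : i * q + min i r < n := by
        rw [pvGuard_iff t n q r i ht hn hq hnr hr0 hrt hi0 hiN]; exact hin
      have hlen : (min t n - i).toNat = (min t n - (i+1)).toNat + 1 := by omega
      have hrange : (List.range ((min t n - i).toNat)).map (fun j : Nat => pvBin q r (i + (j : Int)))
          = pvBin q r i :: (List.range ((min t n - (i+1)).toNat)).map (fun j : Nat => pvBin q r ((i+1) + (j : Int))) := by
        rw [hlen, List.range_succ_eq_map, List.map_cons, List.map_map]
        congr 1
        · norm_num
        · apply List.map_congr_left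
          intro j _
          simp only [Function.comp_apply]
          congr 1
          push_cast
          ring
      rw [hrange]
      by_cases hir : i < r
      · -- residual > 0 branch
        have hres : r - min i r > 0 := by omega
        have h1 : min i r = i := by omega
        have h2 : min (i+1) r = i+1 := by omega
        have ihs := ih (i+1) (acc ++ [pvBin q r i]) (by omega) (by omega) (by omega)
        rw [h2] at ihs
        simp only [pvLoopA, if_pos hctr, if_pos hres]
        have e1 : r - min i r - 1 = r - (i + 1) := by omega
        have e2 : i * q + min i r + q + 1 = (i + 1) * q + (i + 1) := by rw [h1]; ring
        have e3 : acc ++ [[i * q + min i r, i * q + min i r + q]] = acc ++ [pvBin q r i] := by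
          simp [pvBin, if_pos hir, h1]
        rw [e1, e2, e3, ihs]
        simp
      · -- residual = 0 branch
        have hres : ¬ (r - min i r > 0) := by omega
        have h1 : min i r = r := by omega
        have h2 : min (i+1) r = r := by omega
        have ihs := ih (i+1) (acc ++ [pvBin q r i]) (by omega) (by omega) (by omega)
        rw [h2] at ihs
        simp only [pvLoopA, if_pos hctr, if_neg hres]
        have e1 : r - min i r = r - r := by omega
        have e2 : i * q + min i r + q - 1 + 1 = (i + 1) * q + r := by rw [h1]; ring
        have e3 : acc ++ [[i * q + min i r, i * q + min i r + q - 1]] = acc ++ [pvBin q r i] := by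
          simp [pvBin, if_neg hir, h1]
        rw [e1, e2, e3, ihs]
        simp

-- ===== VERDICT (by name: the statement is the Claim_ definition above) =====
theorem get_bin_by_thread_spec : Claim_equal_get_bin_by_thread := by
  intro t n _ hpre
  obtain ⟨ht0, hpos⟩ := hpre
  unfold Spec_get_bin_by_thread get_bin_by_thread get_bin_by_thread_alt
  by_cases hn : 0 < n
  · -- t > 0, n > 0 : the invariant at i = 0 gives B's map
    have ht : 0 < t := by omega
    set q := Int.tdiv n t with hqdef
    set r := PySem.Int.mod n t with hrdef
    have hfd : PySem.Int.floordiv n t = q := by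
      rw [hqdef, PySem.Int.floordiv_eq_ediv_of_pos ht, Int.tdiv_eq_ediv_of_nonneg (by omega)]
    have hnr : n = t * q + r := by
      have := PySem.Int.floordiv_mul_add_mod n t
      rw [hfd] at this; linarith [this]
    have hr0 : 0 ≤ r := PySem.Int.mod_nonneg _ ht
    have hrt : r < t := PySem.Int.mod_lt _ ht
    have hq : 0 ≤ q := by
      rw [hqdef, Int.tdiv_eq_ediv_of_nonneg (by omega)]
      exact Int.ediv_nonneg (by omega) (by omega)
    have inv := pvLoopA_inv t n q r ht hn hq hnr hr0 hrt n.toNat 0 []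
      (le_refl 0) (by omega) (by omega)
    have hm0 : min (0 : Int) r = 0 := by omega
    rw [hm0] at inv
    simp only [sub_zero, zero_mul, zero_add, List.nil_append] at inv
    rw [hfd, inv]
    apply List.map_congr_left
    intro j _
    simp [pvBin]
  · -- n ≤ 0 : both return []
    have h1 : n.toNat = 0 := by omega
    have h2 : (min t n).toNat = 0 := by omega
    rw [h1, h2]
    simp [pvLoopA]
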